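-- pv_equiv track=rewrite | github.com/csiro-robotics/foresttrav | src/nve_lfd/pdag/src/estimation_comparer_w_bplot.py | split_data_into_classification_resutls
-- ===== SOURCE A (Python) =====
-- TE_COMPARE_DICT = {(-1, -1): 4, (0, 0): 1, (1, 0): 2, (0, 1): 3, (1, 1): 0}
--
-- def split_data_into_classification_resutls(L, F):
--     data_ray_count = [[], [], [], [], []]
--     data_occ = [[], [], [], [], []]
--     data_perm = [[], [], [], [], []]
--     for i in range(len(L)):
--         L_i = L[i]
--         F_i = F[i]
--         assert len(L_i) == len(F_i)
--         for j in range(len(L_i)):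
--             class_result = TE_COMPARE_DICT[L_i[j]]
--             data_ray_count[class_result].append(F_i[j][0])
--             data_occ[class_result].append(F_i[j][1])
--             data_perm[class_result].append(F_i[j][2])
--
--     return data_ray_count, data_occ, data_perm
-- ===== SOURCE B (Python) =====
-- TE_COMPARE_DICT = {(-1, -1): 4, (0, 0): 1, (1, 0): 2, (0, 1): 3, (1, 1): 0}
--
-- def split_data_into_classification_resutls(L, F):
--     # flatten the paired rows into one stream of (class, feature-triple) events,
--     # then build each output by filtering that stream per class
--     flat = [(TE_COMPARE_DICT[l], f) for L_i, F_i in zip(L, F) for l, f in zip(L_i, F_i)]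
--     data_ray_count = [[f[0] for c, f in flat if c == k] for k in range(5)]
--     data_occ = [[f[1] for c, f in flat if c == k] for k in range(5)]
--     data_perm = [[f[2] for c, f in flat if c == k] for k in range(5)]
--     return data_ray_count, data_occ, data_perm
-- ===== Notes on version B (the rewrite author's own statement) =====
-- stated objective: alternative
-- what changed: B flattens the zipped (label,feature) rows into one event stream and builds each output by filtering that stream per class, instead of A's index loops mutating five parallel bucket lists by appending at a computed index.
import Mathlib
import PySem

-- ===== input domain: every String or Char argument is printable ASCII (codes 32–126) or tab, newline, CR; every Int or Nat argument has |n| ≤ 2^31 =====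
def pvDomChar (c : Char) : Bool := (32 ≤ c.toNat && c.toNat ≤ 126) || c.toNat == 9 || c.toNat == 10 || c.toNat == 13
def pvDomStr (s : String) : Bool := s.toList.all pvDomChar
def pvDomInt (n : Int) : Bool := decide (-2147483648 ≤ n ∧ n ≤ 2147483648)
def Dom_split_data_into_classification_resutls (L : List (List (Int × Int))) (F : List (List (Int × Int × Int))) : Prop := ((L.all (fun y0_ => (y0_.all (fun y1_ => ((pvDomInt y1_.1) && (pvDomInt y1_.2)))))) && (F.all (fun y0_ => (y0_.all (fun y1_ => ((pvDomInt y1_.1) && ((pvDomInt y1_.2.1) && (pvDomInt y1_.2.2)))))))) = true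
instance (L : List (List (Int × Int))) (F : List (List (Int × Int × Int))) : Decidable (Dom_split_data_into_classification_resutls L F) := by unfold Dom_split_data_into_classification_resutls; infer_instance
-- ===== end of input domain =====

-- B flattens the zipped (label, feature) rows into one event stream and builds each output
-- list by filtering that stream per class, instead of A's index loops appending into five
-- parallel bucket lists (objective: alternative decomposition, same cost).

-- TE_COMPARE_DICT lookup; the final 0 is the KeyError branch, excluded by Pre_
def pvTEDict (p : Int × Int) : Int :=
  if p = (-1, -1) then 4
  else if p = (0, 0) then 1
  else if p = (1, 0) then 2
  else if p = (0, 1) then 3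
  else if p = (1, 1) then 0
  else 0

-- list-of-buckets `.append` at index k (in-range inside Pre_, since class results are 0..4)
def pvAppendAt {α : Type} (ls : List (List α)) (k : Nat) (x : α) : List (List α) :=
  ls.set k ((ls.getD k []) ++ [x])

-- ===== PORT A =====
def split_data_into_classification_resutls (L : List (List (Int × Int))) (F : List (List (Int × Int × Int))) : List (List Int) × List (List Int) × List (List Int) :=
  (PySem.List.pyRange 0 L.length 1).foldl (fun st i =>
    let L_i := PySem.List.pyGetD L i []
    let F_i := PySem.List.pyGetD F i []
    (PySem.List.pyRange 0 L_i.length 1).foldl (fun st j =>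
      let c := (pvTEDict (PySem.List.pyGetD L_i j (0, 0))).toNat
      let f := PySem.List.pyGetD F_i j (0, 0, 0)
      (pvAppendAt st.1 c f.1, pvAppendAt st.2.1 c f.2.1, pvAppendAt st.2.2 c f.2.2)) st)
    ([[], [], [], [], []], [[], [], [], [], []], [[], [], [], [], []])

-- ===== PORT B =====
def split_data_into_classification_resutls_alt (L : List (List (Int × Int))) (F : List (List (Int × Int × Int))) : List (List Int) × List (List Int) × List (List Int) :=
  let flat : List (Int × (Int × Int × Int)) :=
    (L.zip F).flatMap (fun p => (p.1.zip p.2).map (fun q => (pvTEDict q.1, q.2)))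
  ((List.range 5).map (fun (k : Nat) => (flat.filter (fun e => e.1 == (k : Int))).map (fun e => e.2.1)),
   (List.range 5).map (fun (k : Nat) => (flat.filter (fun e => e.1 == (k : Int))).map (fun e => e.2.2.1)),
   (List.range 5).map (fun (k : Nat) => (flat.filter (fun e => e.1 == (k : Int))).map (fun e => e.2.2.2)))

-- ===== PRECONDITION & SPEC =====
-- Pre_ excludes exactly where Python A raises: F shorter than L (IndexError),
-- a row-length mismatch (AssertionError), or an L pair outside TE_COMPARE_DICT (KeyError).
def Pre_split_data_into_classification_resutls (L : List (List (Int × Int))) (F : List (List (Int × Int × Int))) : Prop :=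
  L.length ≤ F.length ∧
  ∀ i < L.length, (L.getD i []).length = (F.getD i []).length ∧
    ∀ p ∈ L.getD i [], p = ((-1 : Int), (-1 : Int)) ∨ p = (0, 0) ∨ p = (1, 0) ∨ p = (0, 1) ∨ p = (1, 1)
instance (L : List (List (Int × Int))) (F : List (List (Int × Int × Int))) : Decidable (Pre_split_data_into_classification_resutls L F) := by unfold Pre_split_data_into_classification_resutls; infer_instance

def pvWitness_split_data_into_classification_resutls : (List (List (Int × Int))) × (List (List (Int × Int × Int))) :=
  ([[(-1, -1), (0, 0)], [(1, 1)]], [[(1, 2, 3), (4, 5, 6)], [(7, 8, 9)]])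

def Spec_split_data_into_classification_resutls (L : List (List (Int × Int))) (F : List (List (Int × Int × Int))) (out : List (List Int) × List (List Int) × List (List Int)) : Prop := out = split_data_into_classification_resutls_alt L F
instance (L : List (List (Int × Int))) (F : List (List (Int × Int × Int))) (out : List (List Int) × List (List Int) × List (List Int)) : Decidable (Spec_split_data_into_classification_resutls L F out) := by unfold Spec_split_data_into_classification_resutls; infer_instance

-- ===== CLAIM (what is proved, stated in full; the proofs are below) =====
def Claim_equal_split_data_into_classification_resutls : Prop := ∀ (L : List (List (Int × Int))) (F : List (List (Int × Int × Int))), Dom_split_data_into_classification_resutls L F → Pre_split_data_into_classification_resutls L F → Spec_split_data_into_classification_resutls L F (split_data_into_classification_resutls L F)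

-- ===== LEMMAS AND PROOFS =====

-- pvTEDict always lands in 0..4
theorem pvTEDict_lt (p : Int × Int) : 0 ≤ pvTEDict p ∧ (pvTEDict p).toNat < 5 := by
  unfold pvTEDict; split_ifs <;> simp

-- indexing a zip of two lists (first no longer than second)
theorem pyGetD_zip {α β : Type} (xs : List α) (ys : List β) (i : Int) (da : α) (db : β)
    (hlen : xs.length ≤ ys.length) (h0 : 0 ≤ i) (h1 : i < (xs.length : Int)) :
    PySem.List.pyGetD (xs.zip ys) i (da, db) =
      (PySem.List.pyGetD xs i da, PySem.List.pyGetD ys i db) := by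
  have hzl : (xs.zip ys).length = xs.length := by simp [List.length_zip]; omega
  rw [PySem.List.pyGetD_eq_getElem (xs.zip ys) (da, db) h0 (by rw [hzl]; exact_mod_cast h1),
      PySem.List.pyGetD_eq_getElem xs da h0 h1,
      PySem.List.pyGetD_eq_getElem ys db h0 (by simp [List.length_zip] at hzl ⊢; omega)]
  exact List.getElem_zip

-- an indexed loop over two parallel lists is a fold over their zip
theorem loop2_eq_zip_foldl {α β σ : Type} (g : σ → α → β → σ) (da : α) (db : β)
    (xs : List α) (ys : List β) (st : σ) (hlen : xs.length ≤ ys.length) :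
    (PySem.List.pyRange 0 xs.length 1).foldl
        (fun st i => g st (PySem.List.pyGetD xs i da) (PySem.List.pyGetD ys i db)) st
      = (xs.zip ys).foldl (fun st p => g st p.1 p.2) st := by
  have hzl : (xs.zip ys).length = xs.length := by simp [List.length_zip]; omega
  have hcongr : (PySem.List.pyRange 0 ((xs.zip ys).length : Int) 1).foldl
      (fun st i => g st (PySem.List.pyGetD xs i da) (PySem.List.pyGetD ys i db)) st
      = (PySem.List.pyRange 0 ((xs.zip ys).length : Int) 1).foldl
      (fun st i => (fun st (p : α × β) => g st p.1 p.2) st (PySem.List.pyGetD (xs.zip ys) i (da, db))) st := by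
    refine PySem.List.foldl_congr_mem _ _ _ _ ?_
    intro acc i hi
    have hmem := (PySem.List.mem_pyRange_one).mp hi
    have h1 : i < (xs.length : Int) := by
      have := hmem.2; rw [hzl] at this; exact this
    rw [pyGetD_zip xs ys i da db hlen hmem.1 h1]
  rw [show ((xs.length : Int)) = ((xs.zip ys).length : Int) by rw [hzl]]
  rw [hcongr, PySem.List.foldl_pyRange_zero_pyGetD' (xs.zip ys) (da, db)
        (fun st (p : α × β) => g st p.1 p.2) st]

-- the bucket read off a single append-at
theorem getD_pvAppendAt (b : List (List Int)) (c k : Nat) (x : Int)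
    (hc : c < b.length) (hk : k < b.length) :
    (pvAppendAt b c x).getD k [] = b.getD k [] ++ (if k = c then [x] else []) := by
  unfold pvAppendAt
  by_cases hke : k = c
  · subst hke
    rw [List.getD_eq_getElem _ _ (by simpa using hk), List.getElem_set_self (by simpa using hk),
        if_pos rfl]
  · rw [List.getD_eq_getElem _ _ (by simpa using hk),
        List.getElem_set_ne (fun h => hke h.symm) (by simpa using hk),
        ← List.getD_eq_getElem _ _ hk, if_neg hke, List.append_nil]

-- appending at computed indices < 5, described as per-class filters of the event stream
theorem appendAt_foldl_eq_filter {ε : Type} (cl : ε → Int) (v : ε → Int) :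
    ∀ (es : List ε), (∀ e ∈ es, 0 ≤ cl e ∧ (cl e).toNat < 5) →
    ∀ (b : List (List Int)), b.length = 5 →
    es.foldl (fun b e => pvAppendAt b (cl e).toNat (v e)) b
      = (List.range 5).map (fun (k : Nat) => b.getD k [] ++ (es.filter (fun e => cl e == (k : Int))).map v) := by
  intro es
  induction es with
  | nil =>
    intro _ b hb
    simp only [List.foldl_nil, List.filter_nil, List.map_nil, List.append_nil]
    refine List.ext_getElem (by simpa using hb) ?_
    intro k h1 h2
    simp only [List.getElem_map, List.getElem_range]
    rw [List.getD_eq_getElem _ _ (by omega)]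
  | cons e rest ih =>
    intro hcl b hb
    have he : 0 ≤ cl e ∧ (cl e).toNat < 5 := hcl e (List.mem_cons_self ..)
    have hblen : (pvAppendAt b (cl e).toNat (v e)).length = 5 := by
      simp [pvAppendAt, hb]
    rw [List.foldl_cons, ih (fun x hx => hcl x (List.mem_cons_of_mem _ hx)) _ hblen]
    refine List.map_congr_left ?_
    intro k hk
    have hk5 : k < 5 := List.mem_range.mp hk
    rw [getD_pvAppendAt b _ k (v e) (by omega) (by omega)]
    by_cases hc : cl e == (k : Int)
    · have hkc : k = (cl e).toNat := by
        have := he.1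
        simp only [beq_iff_eq] at hc
        omega
      rw [if_pos hkc, List.filter_cons, if_pos hc, List.map_cons, List.append_assoc]
      rfl
    · have hkc : ¬ k = (cl e).toNat := by
        have := he.1
        simp only [beq_iff_eq] at hc
        omega
      rw [if_neg hkc, List.append_nil, List.filter_cons, if_neg hc]

-- ===== VERDICT (by name: the statement is the Claim_ definition above) =====
theorem split_data_into_classification_resutls_spec : Claim_equal_split_data_into_classification_resutls := by
  unfold Claim_equal_split_data_into_classification_resutls
  intro L F _ hpre
  unfold Spec_split_data_into_classification_resutls
  unfold split_data_into_classification_resutls split_data_into_classification_resutls_alt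
  dsimp only
  obtain ⟨hlen, hrows⟩ := hpre
  -- 1) turn A's outer indexed loop into a fold over L.zip F
  rw [loop2_eq_zip_foldl (fun st L_i F_i =>
        (PySem.List.pyRange 0 L_i.length 1).foldl (fun st j =>
          let c := (pvTEDict (PySem.List.pyGetD L_i j (0, 0))).toNat
          let f := PySem.List.pyGetD F_i j (0, 0, 0)
          (pvAppendAt st.1 c f.1, pvAppendAt st.2.1 c f.2.1, pvAppendAt st.2.2 c f.2.2)) st)
        [] [] L F _ hlen]
  -- 2) turn each inner indexed loop into a fold over L_i.zip F_i (row lengths are equal inside Pre_)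
  rw [show (L.zip F).foldl (fun st (p : List (Int × Int) × List (Int × Int × Int)) =>
        (PySem.List.pyRange 0 p.1.length 1).foldl (fun st j =>
          let c := (pvTEDict (PySem.List.pyGetD p.1 j (0, 0))).toNat
          let f := PySem.List.pyGetD p.2 j (0, 0, 0)
          (pvAppendAt st.1 c f.1, pvAppendAt st.2.1 c f.2.1, pvAppendAt st.2.2 c f.2.2)) st)
        (([[], [], [], [], []], [[], [], [], [], []], [[], [], [], [], []]) :
          List (List Int) × List (List Int) × List (List Int))
      = (L.zip F).foldl (fun st p =>
          (p.1.zip p.2).foldl (fun st q =>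
            (pvAppendAt st.1 (pvTEDict q.1).toNat q.2.1,
             pvAppendAt st.2.1 (pvTEDict q.1).toNat q.2.2.1,
             pvAppendAt st.2.2 (pvTEDict q.1).toNat q.2.2.2)) st)
          ([[], [], [], [], []], [[], [], [], [], []], [[], [], [], [], []]) by
    refine PySem.List.foldl_congr_mem _ _ _ _ ?_
    intro acc p hp
    obtain ⟨i, hi, hget⟩ := List.getElem_of_mem hp
    have hi' : i < L.length := by
      have := hi; simp [List.length_zip] at this; omega
    have hiF : i < F.length := by omega
    have hp1 : p = (L[i], F[i]) := by rw [← hget]; exact List.getElem_zip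
    have hrl : p.1.length = p.2.length := by
      have := (hrows i hi').1
      rw [List.getD_eq_getElem _ _ hi', List.getD_eq_getElem _ _ hiF] at this
      rw [hp1]
      exact this
    exact loop2_eq_zip_foldl (fun st l f =>
      (pvAppendAt st.1 (pvTEDict l).toNat f.1,
       pvAppendAt st.2.1 (pvTEDict l).toNat f.2.1,
       pvAppendAt st.2.2 (pvTEDict l).toNat f.2.2)) (0, 0) (0, 0, 0) p.1 p.2 acc (le_of_eq hrl)]
  -- 3) fuse the two folds into one fold over the flattened event stream
  rw [show (L.zip F).foldl (fun st (p : List (Int × Int) × List (Int × Int × Int)) =>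
        (p.1.zip p.2).foldl (fun st q =>
          (pvAppendAt st.1 (pvTEDict q.1).toNat q.2.1,
           pvAppendAt st.2.1 (pvTEDict q.1).toNat q.2.2.1,
           pvAppendAt st.2.2 (pvTEDict q.1).toNat q.2.2.2)) st)
        (([[], [], [], [], []], [[], [], [], [], []], [[], [], [], [], []]) :
          List (List Int) × List (List Int) × List (List Int))
      = ((L.zip F).flatMap (fun p => (p.1.zip p.2).map (fun q => (pvTEDict q.1, q.2)))).foldl
          (fun st e =>
            (pvAppendAt st.1 e.1.toNat e.2.1,
             pvAppendAt st.2.1 e.1.toNat e.2.2.1,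
             pvAppendAt st.2.2 e.1.toNat e.2.2.2))
          ([[], [], [], [], []], [[], [], [], [], []], [[], [], [], [], []]) by
    rw [List.foldl_flatMap]
    refine PySem.List.foldl_congr_mem _ _ _ _ ?_
    intro acc p _
    rw [List.foldl_map]]
  -- 4) split the triple-state fold into components and apply the per-class filter shape
  have hcl : ∀ e ∈ (L.zip F).flatMap (fun p => (p.1.zip p.2).map (fun q => (pvTEDict q.1, q.2))),
      0 ≤ e.1 ∧ e.1.toNat < 5 := by
    intro e he
    obtain ⟨p, _, he⟩ := List.mem_flatMap.mp he
    obtain ⟨q, _, rfl⟩ := List.mem_map.mp he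
    exact pvTEDict_lt q.1
  have hsplit : ∀ (es : List (Int × (Int × Int × Int))) (a b c : List (List Int)),
      es.foldl (fun st e =>
        (pvAppendAt st.1 e.1.toNat e.2.1,
         pvAppendAt st.2.1 e.1.toNat e.2.2.1,
         pvAppendAt st.2.2 e.1.toNat e.2.2.2)) (a, b, c)
      = (es.foldl (fun x e => pvAppendAt x e.1.toNat e.2.1) a,
         es.foldl (fun x e => pvAppendAt x e.1.toNat e.2.2.1) b,
         es.foldl (fun x e => pvAppendAt x e.1.toNat e.2.2.2) c) := by
    intro es
    induction es with
    | nil => intro a b c; rfl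
    | cons e t ih => intro a b c; exact ih _ _ _
  rw [hsplit]
  have hinit : ∀ k : Nat, ([[], [], [], [], []] : List (List Int)).getD k [] = [] := by
    intro k
    rcases k with _|_|_|_|_|k <;> simp [List.getD]
  refine Prod.ext ?_ (Prod.ext ?_ ?_)
  · dsimp only
    rw [appendAt_foldl_eq_filter (fun (e : Int × (Int × Int × Int)) => e.1) (fun e => e.2.1) _ hcl _ rfl]
    refine List.map_congr_left ?_
    intro k _
    rw [hinit k, List.nil_append]
  · dsimp only
    rw [appendAt_foldl_eq_filter (fun (e : Int × (Int × Int × Int)) => e.1) (fun e => e.2.2.1) _ hcl _ rfl]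
    refine List.map_congr_left ?_
    intro k _
    rw [hinit k, List.nil_append]
  · dsimp only
    rw [appendAt_foldl_eq_filter (fun (e : Int × (Int × Int × Int)) => e.1) (fun e => e.2.2.2) _ hcl _ rfl]
    refine List.map_congr_left ?_
    intro k _
    rw [hinit k, List.nil_append]
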